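-- pv_equiv track=rewrite | github.com/Eugenia-Z/PracticalProblems | Others/Bentley/minRobotsRunBFS.py | BFSSolution
-- ===== SOURCE A (Python) =====
-- from collections import deque
--
-- def BFSSolution(plan):
--     rows, cols = len(plan), len(plan[0])
--     visited = [[False for _ in range(cols)] for _ in range(rows)]
--
--     def bfs(r, c):
--         # Queue-based BFS to mark all connected dirty cells as visited
--         queue = deque([(r, c)])
--         while queue:
--             x, y = queue.popleft()
--             # Check boundaries
--             if x < 0 or x >= rows or y < 0 or y >= cols:
--                 continue
--             # Skip if already visited or if it's a wall
--             if visited[x][y] == True or plan[x][y] == '#':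
--                 continue
--
--             # Visit the current cell and enqueue all the four possible directions
--             visited[x][y] = True
--             queue.extend([(x+1, y), (x-1, y), (x, y+1), (x, y-1)])
--
--     runs = 0
--     for i in range(rows):
--         for j in range(cols):
--             # Start BFS for each unvisited dirty cell
--             if plan[i][j] == '*' and not visited[i][j]:
--                 bfs(i, j)
--                 runs += 1
--     return runs
-- ===== SOURCE B (Python) =====
-- def BFSSolution(plan):
--     rows, cols = len(plan), len(plan[0])
--     parent = list(range(rows * cols))
--
--     def find(i):
--         while parent[i] != i:
--             i = parent[i]
--         return i
--
--     def union(a, b):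
--         ra, rb = find(a), find(b)
--         if ra < rb:
--             parent[rb] = ra
--         elif rb < ra:
--             parent[ra] = rb
--
--     for i in range(rows):
--         for j in range(cols):
--             if plan[i][j] != '#':
--                 if i + 1 < rows and plan[i + 1][j] != '#':
--                     union(i * cols + j, (i + 1) * cols + j)
--                 if j + 1 < cols and plan[i][j + 1] != '#':
--                     union(i * cols + j, i * cols + j + 1)
--
--     roots = set()
--     for i in range(rows):
--         for j in range(cols):
--             if plan[i][j] == '*':
--                 roots.add(find(i * cols + j))
--     return len(roots)
-- ===== Notes on version B (the rewrite author's own statement) =====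
-- stated objective: alternative
-- what changed: Replaces the per-seed queue BFS with a visited boolean matrix by a union-find over flattened cell indices: one pass unions every non-wall cell with its right and down non-wall neighbours, then the answer is the number of distinct roots of '*' cells.
-- outside the precondition, e.g. on BFSSolution([]): A raises IndexError, B raises IndexError; on BFSSolution([['*', '.'], ['*']]): A raises IndexError, B raises IndexError
import Mathlib
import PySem

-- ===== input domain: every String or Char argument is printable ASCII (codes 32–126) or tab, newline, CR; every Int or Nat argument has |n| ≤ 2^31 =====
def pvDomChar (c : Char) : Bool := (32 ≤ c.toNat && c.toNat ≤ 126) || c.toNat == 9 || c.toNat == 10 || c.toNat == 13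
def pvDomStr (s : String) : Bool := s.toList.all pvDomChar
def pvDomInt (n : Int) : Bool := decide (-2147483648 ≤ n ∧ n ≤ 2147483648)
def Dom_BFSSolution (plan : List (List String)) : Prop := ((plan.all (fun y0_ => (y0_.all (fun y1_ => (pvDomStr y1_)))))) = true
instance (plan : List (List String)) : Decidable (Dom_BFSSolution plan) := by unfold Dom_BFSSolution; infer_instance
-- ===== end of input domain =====

-- B replaces A's per-seed queue BFS over a visited matrix by a union-find over flattened
-- cell indices (union right/down non-wall neighbours, then count distinct roots of '*' cells):
-- a genuinely different algorithm of similar cost (objective: alternative).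

-- ===== PORT A =====

-- plan[x][y] (both ports only evaluate it at indices that are in range under Pre_)
def pvCell (plan : List (List String)) (x y : Nat) : String :=
  (plan.getD x []).getD y ""

-- visited[x][y] (false when out of range; pvBfs reads it only after its bound checks)
def pvMem (m : List (List Bool)) (x y : Nat) : Bool :=
  (m.getD x []).getD y false

-- row with row[y] = True; the padding branch is unreachable in every call pvBfs makes
-- (the bound checks guarantee y is in range), so this is exactly Python's assignment there.
def pvRowSet (row : List Bool) (y : Nat) : List Bool :=
  if y < row.length then row.set y true
  else row ++ (List.replicate (y - row.length) false ++ [true])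

-- visited[x][y] = True; exact for in-range x (the guards in pvBfs ensure this).
def pvSetTrue (m : List (List Bool)) (x y : Nat) : List (List Bool) :=
  if x < m.length then m.set x (pvRowSet (m.getD x []) y)
  else m ++ (List.replicate (x - m.length) [] ++ [pvRowSet [] y])

-- generic list facts cited by pvMem_setTrue (needed above pvBfs for its termination proof)
theorem pvPadGetD {α : Type} (l : List α) (k : Nat) (d v : α) (c : Nat) (hk : l.length ≤ k) :
    (l ++ (List.replicate (k - l.length) d ++ [v])).getD c d = if c = k then v else l.getD c d := by
  simp only [List.getD_eq_getElem?_getD]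
  by_cases hc : c < l.length
  · rw [List.getElem?_append_left hc, if_neg (by omega)]
  · have hl : l[c]? = none := List.getElem?_eq_none_iff.mpr (by omega)
    rw [List.getElem?_append_right (by omega), hl]
    by_cases hck : c = k
    · subst hck
      rw [List.getElem?_append_right (by simp)]
      have h0 : c - l.length - (List.replicate (c - l.length) d).length = 0 := by simp
      rw [h0]
      simp
    · rw [if_neg hck]
      by_cases hlt : c < k
      · have hw : c - l.length < k - l.length := by omega
        rw [List.getElem?_append_left (by simpa using hw)]
        simp [List.getElem?_replicate, hw]
      · rw [List.getElem?_append_right (by simp; omega)]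
        have h0 : c - l.length - (List.replicate (k - l.length) d).length ≠ 0 := by simp; omega
        rcases Nat.exists_eq_succ_of_ne_zero h0 with ⟨n, hn⟩
        rw [hn]
        simp

theorem pvSetGetD {α : Type} (l : List α) (i : Nat) (v : α) (j : Nat) (d : α) :
    (l.set i v).getD j d = if j = i ∧ i < l.length then v else l.getD j d := by
  simp only [List.getD_eq_getElem?_getD]
  rw [List.getElem?_set]
  split_ifs with h1 h2 h3 <;> simp_all

theorem pvMem_setTrue (m : List (List Bool)) (x y a b : Nat) :
    pvMem (pvSetTrue m x y) a b = if a = x ∧ b = y then true else pvMem m a b := by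
  have hrow : ∀ (row : List Bool) (c : Nat),
      (pvRowSet row y).getD c false = if c = y then true else row.getD c false := by
    intro row c
    unfold pvRowSet
    by_cases hy : y < row.length
    · rw [if_pos hy, pvSetGetD]
      by_cases hcy : c = y
      · simp [hcy, hy]
      · simp [hcy]
    · rw [if_neg hy, pvPadGetD _ _ _ _ _ (by omega)]
  unfold pvMem pvSetTrue
  by_cases hx : x < m.length
  · rw [if_pos hx, pvSetGetD]
    by_cases hax : a = x
    · rw [if_pos ⟨hax, hx⟩, hrow]
      subst hax
      by_cases hby : b = y <;> simp [hby]
    · rw [if_neg (by tauto)]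
      simp [hax]
  · rw [if_neg hx, pvPadGetD _ _ _ _ _ (by omega)]
    by_cases hax : a = x
    · subst hax
      rw [if_pos rfl, hrow]
      have hma : m.getD a [] = [] := by
        simp [List.getD_eq_getElem?_getD, List.getElem?_eq_none_iff.mpr (by omega : m.length ≤ a)]
      rw [hma]
      by_cases hby : b = y <;> simp [hby]
    · rw [if_neg hax]
      simp [hax]

def pvUnvis (R C : Nat) (m : List (List Bool)) : Nat :=
  (((Finset.range R) ×ˢ (Finset.range C)).filter (fun p => pvMem m p.1 p.2 = false)).card

theorem pvUnvis_setTrue_lt {R C x y : Nat} (m : List (List Bool))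
    (hx : x < R) (hy : y < C) (h : pvMem m x y = false) :
    pvUnvis R C (pvSetTrue m x y) < pvUnvis R C m := by
  apply Finset.card_lt_card
  constructor
  · intro p hp
    simp only [Finset.mem_filter, Finset.mem_product, Finset.mem_range] at hp ⊢
    refine ⟨hp.1, ?_⟩
    have h2 := hp.2
    rw [pvMem_setTrue] at h2
    split at h2
    · simp at h2
    · exact h2
  · intro hsub
    have hmem : (x, y) ∈ ((Finset.range R) ×ˢ (Finset.range C)).filter
        (fun p => pvMem m p.1 p.2 = false) := by
      simp [Finset.mem_filter, Finset.mem_product, Finset.mem_range, hx, hy, h]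
    have h3 := hsub hmem
    simp only [Finset.mem_filter] at h3
    rw [pvMem_setTrue] at h3
    simp at h3

-- the nested 'def bfs' of A: queue-based flood fill
def pvBfs (plan : List (List String)) (rows cols : Int)
    (queue : List (Int × Int)) (visited : List (List Bool)) : List (List Bool) :=
  match queue with
  | [] => visited
  | (x, y) :: rest =>
    if x < 0 ∨ rows ≤ x ∨ y < 0 ∨ cols ≤ y then
      pvBfs plan rows cols rest visited
    else if pvMem visited x.toNat y.toNat = true ∨ pvCell plan x.toNat y.toNat = "#" then
      pvBfs plan rows cols rest visited
    else
      pvBfs plan rows cols (rest ++ [(x+1, y), (x-1, y), (x, y+1), (x, y-1)])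
        (pvSetTrue visited x.toNat y.toNat)
termination_by (pvUnvis rows.toNat cols.toNat visited, queue.length)
decreasing_by
  · exact Prod.Lex.right _ (by simp)
  · exact Prod.Lex.right _ (by simp)
  · exact Prod.Lex.left _ _ (pvUnvis_setTrue_lt _ (by omega) (by omega) (by simp_all))

def BFSSolution (plan : List (List String)) : Int :=
  let rows := plan.length
  let cols := plan.headI.length
  let st := (List.range rows).foldl (fun st i =>
    (List.range cols).foldl (fun st j =>
      if pvCell plan i j = "*" ∧ pvMem st.1 i j = false then
        (pvBfs plan rows cols [((i : Int), (j : Int))] st.1, st.2 + 1)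
      else st) st) (List.replicate rows (List.replicate cols false), (0 : Int))
  st.2

-- ===== PORT B =====

-- 'while parent[i] != i: i = parent[i]': B only ever points a root at a SMALLER root,
-- so parent[i] ≤ i throughout and the loop test parent[i] != i is exactly parent[i] < i.
def dsuFind (parent : List Nat) (i : Nat) : Nat :=
  if _h : parent.getD i i < i then dsuFind parent (parent.getD i i) else i
termination_by i

def dsuUnion (parent : List Nat) (a b : Nat) : List Nat :=
  let ra := dsuFind parent a
  let rb := dsuFind parent b
  if ra < rb then parent.set rb ra
  else if rb < ra then parent.set ra rb
  else parent

def BFSSolution_alt (plan : List (List String)) : Int :=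
  let rows := plan.length
  let cols := plan.headI.length
  let parent := (List.range rows).foldl (fun par i =>
    (List.range cols).foldl (fun par j =>
      if pvCell plan i j ≠ "#" then
        let par1 := if i + 1 < rows ∧ pvCell plan (i+1) j ≠ "#" then
            dsuUnion par (i * cols + j) ((i+1) * cols + j) else par
        if j + 1 < cols ∧ pvCell plan i (j+1) ≠ "#" then
          dsuUnion par1 (i * cols + j) (i * cols + j + 1) else par1
      else par) par) (List.range (rows * cols))
  let roots := (List.range rows).foldl (fun (s : PySem.Set Nat) i =>
    (List.range cols).foldl (fun s j =>
      if pvCell plan i j = "*" then PySem.Set.add s (dsuFind parent (i * cols + j)) else s) s)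
    PySem.Set.empty
  (roots.length : Int)

-- ===== PRECONDITION & SPEC =====

-- Pre_ excludes exactly the inputs on which A raises IndexError: the empty grid
-- (len(plan[0])) and grids with a row shorter than the first row (plan[i][j] with
-- j < cols). A returns normally on every other input.
def Pre_BFSSolution (plan : List (List String)) : Prop :=
  plan ≠ [] ∧ ∀ row ∈ plan, plan.headI.length ≤ row.length

instance (plan : List (List String)) : Decidable (Pre_BFSSolution plan) := by
  unfold Pre_BFSSolution; infer_instance

def pvWitness_BFSSolution : List (List String) := [["*", "#"], [".", "*"]]

def Spec_BFSSolution (plan : List (List String)) (out : Int) : Prop := out = BFSSolution_alt plan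
instance (plan : List (List String)) (out : Int) : Decidable (Spec_BFSSolution plan out) := by
  unfold Spec_BFSSolution; infer_instance

-- ===== CLAIM (what is proved, stated in full; the proofs are below) =====
def Claim_equal_BFSSolution : Prop := ∀ (plan : List (List String)), Dom_BFSSolution plan → Pre_BFSSolution plan → Spec_BFSSolution plan (BFSSolution plan)

-- ===== LEMMAS AND PROOFS =====

-- ---- the abstract grid graph ----

def pvGood (plan : List (List String)) (p : Nat × Nat) : Prop :=
  p.1 < plan.length ∧ p.2 < plan.headI.length ∧ pvCell plan p.1 p.2 ≠ "#"

def pvAdj (plan : List (List String)) (p q : Nat × Nat) : Prop :=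
  pvGood plan p ∧ pvGood plan q ∧
    ((p.1 = q.1 ∧ (p.2 + 1 = q.2 ∨ q.2 + 1 = p.2)) ∨
     (p.2 = q.2 ∧ (p.1 + 1 = q.1 ∨ q.1 + 1 = p.1)))

def pvConn (plan : List (List String)) : (Nat × Nat) → (Nat × Nat) → Prop :=
  Relation.ReflTransGen (pvAdj plan)

theorem pvAdj_symm (plan : List (List String)) : Symmetric (pvAdj plan) := by
  intro p q h
  obtain ⟨hp, hq, hrel⟩ := h
  exact ⟨hq, hp, by tauto⟩

theorem pvConn_symm (plan : List (List String)) {p q : Nat × Nat} (h : pvConn plan p q) :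
    pvConn plan q p :=
  (Relation.ReflTransGen.symmetric (pvAdj_symm plan)) h

-- reachability avoiding a visited set
inductive pvRA {α : Type} (adj : α → α → Prop) (V : α → Prop) : α → α → Prop
  | refl (a : α) (h : ¬ V a) : pvRA adj V a a
  | head (a b c : α) (h : ¬ V a) (hadj : adj a b) (htail : pvRA adj V b c) : pvRA adj V a c

theorem pvRA_not_V {α : Type} {adj : α → α → Prop} {V : α → Prop} {a t : α}
    (h : pvRA adj V a t) : ¬ V a := by
  cases h <;> assumption

theorem pvRA_congr {α : Type} {adj : α → α → Prop} {V W : α → Prop}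
    (hVW : ∀ a, V a ↔ W a) {y t : α} (h : pvRA adj V y t) : pvRA adj W y t := by
  induction h with
  | refl a ha => exact pvRA.refl a (fun hw => ha ((hVW a).mpr hw))
  | head a b c ha hadj _ ih => exact pvRA.head a b c (fun hw => ha ((hVW a).mpr hw)) hadj ih

-- removing a freshly visited element x from the available set
theorem pvRA_remove {α : Type} (adj : α → α → Prop) (V : α → Prop) (x : α) :
    ∀ y t, pvRA adj V y t →
      pvRA adj (fun a => V a ∨ a = x) y t ∨ t = x ∨
        ∃ n, adj x n ∧ pvRA adj (fun a => V a ∨ a = x) n t := by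
  intro y t h
  induction h with
  | refl a ha =>
    by_cases hax : a = x
    · exact Or.inr (Or.inl hax)
    · exact Or.inl (pvRA.refl a (by tauto))
  | head a b c ha hadj htail ih =>
    by_cases hax : a = x
    · subst hax
      rcases ih with h1 | h2 | h3
      · exact Or.inr (Or.inr ⟨b, hadj, h1⟩)
      · exact Or.inr (Or.inl h2)
      · exact Or.inr (Or.inr h3)
    · rcases ih with h1 | h2 | h3
      · exact Or.inl (pvRA.head a b c (by tauto) hadj h1)
      · exact Or.inr (Or.inl h2)
      · exact Or.inr (Or.inr h3)

theorem pvRA_of_closed {α : Type} (adj : α → α → Prop) (V : α → Prop)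
    (hsym : Symmetric adj) (hcl : ∀ p q, V p → adj p q → V q) :
    ∀ s t, ¬ V s → Relation.ReflTransGen adj s t → pvRA adj V s t := by
  intro s t hs h
  revert hs
  induction h using Relation.ReflTransGen.head_induction_on with
  | refl => intro h2; exact pvRA.refl t h2
  | head h1 h2 ih =>
    intro ha
    exact pvRA.head _ _ _ ha h1 (ih (fun hv => ha (hcl _ _ hv (hsym h1))))

-- ---- correctness of A's flood fill ----

def pvQok (plan : List (List String)) (q : Int × Int) : Prop :=
  0 ≤ q.1 ∧ q.1 < (plan.length : Int) ∧ 0 ≤ q.2 ∧ q.2 < (plan.headI.length : Int)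

def pvQcell (q : Int × Int) : Nat × Nat := (q.1.toNat, q.2.toNat)

def pvMemP (m : List (List Bool)) (p : Nat × Nat) : Prop := pvMem m p.1 p.2 = true

theorem pvMemP_setTrue (m : List (List Bool)) (cx cy : Nat) (p : Nat × Nat) :
    pvMemP (pvSetTrue m cx cy) p ↔ (pvMemP m p ∨ p = (cx, cy)) := by
  obtain ⟨a, b⟩ := p
  show pvMem (pvSetTrue m cx cy) a b = true ↔ (pvMem m a b = true ∨ (a, b) = (cx, cy))
  rw [pvMem_setTrue]
  split_ifs with h
  · simp [Prod.ext_iff, h.1, h.2]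
  · simp [Prod.ext_iff, h]

theorem pvMem_replicate (R C a b : Nat) :
    pvMem (List.replicate R (List.replicate C false)) a b = false := by
  unfold pvMem
  rcases Nat.lt_or_ge a R with h | h
  · have h1 : (List.replicate R (List.replicate C false)).getD a [] = List.replicate C false := by
      simp [List.getD_eq_getElem?_getD, List.getElem?_replicate, h]
    rw [h1]
    rcases Nat.lt_or_ge b C with h2 | h2
    · simp [List.getD_eq_getElem?_getD, List.getElem?_replicate, h2]
    · have h3 : (List.replicate C false)[b]? = none := List.getElem?_eq_none_iff.mpr (by simpa using h2)
      simp [List.getD_eq_getElem?_getD, h3]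
  · have h1 : (List.replicate R (List.replicate C false))[a]? = none :=
      List.getElem?_eq_none_iff.mpr (by simpa using h)
    simp [List.getD_eq_getElem?_getD, h1]

theorem pvBfs_nil (plan : List (List String)) (rows cols : Int) (visited : List (List Bool)) :
    pvBfs plan rows cols [] visited = visited := by
  rw [pvBfs]

theorem pvBfs_cons (plan : List (List String)) (rows cols x y : Int) (rest : List (Int × Int))
    (visited : List (List Bool)) :
    pvBfs plan rows cols ((x, y) :: rest) visited =
      if x < 0 ∨ rows ≤ x ∨ y < 0 ∨ cols ≤ y then pvBfs plan rows cols rest visited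
      else if pvMem visited x.toNat y.toNat = true ∨ pvCell plan x.toNat y.toNat = "#" then
        pvBfs plan rows cols rest visited
      else pvBfs plan rows cols (rest ++ [(x+1, y), (x-1, y), (x, y+1), (x, y-1)])
        (pvSetTrue visited x.toNat y.toNat) := by
  rw [pvBfs]

theorem pvBfs_char (plan : List (List String)) (s0 : Nat × Nat) :
    ∀ (queue : List (Int × Int)) (m : List (List Bool)),
      (∀ q ∈ queue, pvQok plan q → pvGood plan (pvQcell q) → pvConn plan s0 (pvQcell q)) →
      (∀ t, pvGood plan t → pvConn plan s0 t → ¬ pvMemP m t →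
        ∃ q ∈ queue, pvQok plan q ∧ pvRA (pvAdj plan) (pvMemP m) (pvQcell q) t) →
      ∀ p, pvMemP (pvBfs plan (plan.length : Int) (plan.headI.length : Int) queue m) p ↔
        (pvMemP m p ∨ (pvGood plan p ∧ pvConn plan s0 p)) := by
  intro queue m
  induction queue, m using pvBfs.induct plan ((plan.length : Int)) ((plan.headI.length : Int)) with
  | case1 visited =>
    intro hq hcomp p
    rw [pvBfs_nil]
    constructor
    · intro h
      exact Or.inl h
    · rintro (h | ⟨hgp, hcp⟩)
      · exact h
      · by_cases hm : pvMemP visited p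
        · exact hm
        · rcases hcomp p hgp hcp hm with ⟨q, hqm, _⟩
          simp at hqm
  | case2 visited x y rest h1 ih =>
    intro hq hcomp p
    rw [pvBfs_cons, if_pos h1]
    apply ih
    · intro q hqm hqok hqg
      exact hq q (List.mem_cons_of_mem _ hqm) hqok hqg
    · intro t hgt hct hmt
      rcases hcomp t hgt hct hmt with ⟨q, hqm, hqok, hra⟩
      rcases List.mem_cons.mp hqm with rfl | hqm'
      · exfalso
        have ha : (0:Int) ≤ x := hqok.1
        have hb : x < (plan.length : Int) := hqok.2.1
        have hc : (0:Int) ≤ y := hqok.2.2.1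
        have hd : y < (plan.headI.length : Int) := hqok.2.2.2
        omega
      · exact ⟨q, hqm', hqok, hra⟩
  | case3 visited x y rest h1 h2 ih =>
    intro hq hcomp p
    rw [pvBfs_cons, if_neg h1, if_pos h2]
    apply ih
    · intro q hqm hqok hqg
      exact hq q (List.mem_cons_of_mem _ hqm) hqok hqg
    · intro t hgt hct hmt
      rcases hcomp t hgt hct hmt with ⟨q, hqm, hqok, hra⟩
      rcases List.mem_cons.mp hqm with rfl | hqm'
      · exfalso
        rcases h2 with h2 | h2
        · exact pvRA_not_V hra h2
        · cases hra with
          | refl a ha => exact hgt.2.2 h2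
          | head a b c ha hadj htail => exact hadj.1.2.2 h2
      · exact ⟨q, hqm', hqok, hra⟩
  | case4 visited x y rest h1 h2 ih =>
    intro hq hcomp p
    have h1' : 0 ≤ x ∧ x < (plan.length : Int) ∧ 0 ≤ y ∧ y < (plan.headI.length : Int) := by
      push_neg at h1
      exact ⟨h1.1, h1.2.1, h1.2.2.1, h1.2.2.2⟩
    have h2' : pvMem visited x.toNat y.toNat = false ∧ pvCell plan x.toNat y.toNat ≠ "#" := by
      push_neg at h2
      exact ⟨by simpa using h2.1, h2.2⟩
    have hcg : pvGood plan (x.toNat, y.toNat) := ⟨by omega, by omega, h2'.2⟩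
    have hconn : pvConn plan s0 (x.toNat, y.toNat) :=
      hq (x, y) (by simp) ⟨h1'.1, h1'.2.1, h1'.2.2.1, h1'.2.2.2⟩ hcg
    have hm' := pvMemP_setTrue visited x.toNat y.toNat
    have hq2 : ∀ q ∈ rest ++ [(x+1,y),(x-1,y),(x,y+1),(x,y-1)], pvQok plan q →
        pvGood plan (pvQcell q) → pvConn plan s0 (pvQcell q) := by
      intro q hmem hqok hqg
      rcases List.mem_append.mp hmem with hmem | hmem
      · exact hq q (List.mem_cons_of_mem _ hmem) hqok hqg
      · simp only [List.mem_cons, List.not_mem_nil, or_false] at hmem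
        have hbase : ∀ n : Nat × Nat, pvAdj plan (x.toNat, y.toNat) n → pvConn plan s0 n :=
          fun n hstep => Relation.ReflTransGen.tail hconn hstep
        rcases hmem with rfl | rfl | rfl | rfl
        · have hn : pvQcell (x + 1, y) = (x.toNat + 1, y.toNat) := by
            simp only [pvQcell]
            rw [show (x + 1).toNat = x.toNat + 1 from by omega]
          rw [hn] at hqg ⊢
          exact hbase _ ⟨hcg, hqg, Or.inr ⟨rfl, Or.inl rfl⟩⟩
        · have ha : (0:Int) ≤ x - 1 := hqok.1
          have hn : pvQcell (x - 1, y) = (x.toNat - 1, y.toNat) := by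
            simp only [pvQcell]
            rw [show (x - 1).toNat = x.toNat - 1 from by omega]
          rw [hn] at hqg ⊢
          exact hbase _ ⟨hcg, hqg, Or.inr ⟨rfl, Or.inr (by omega)⟩⟩
        · have hn : pvQcell (x, y + 1) = (x.toNat, y.toNat + 1) := by
            simp only [pvQcell]
            rw [show (y + 1).toNat = y.toNat + 1 from by omega]
          rw [hn] at hqg ⊢
          exact hbase _ ⟨hcg, hqg, Or.inl ⟨rfl, Or.inl rfl⟩⟩
        · have hc : (0:Int) ≤ y - 1 := hqok.2.2.1
          have hn : pvQcell (x, y - 1) = (x.toNat, y.toNat - 1) := by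
            simp only [pvQcell]
            rw [show (y - 1).toNat = y.toNat - 1 from by omega]
          rw [hn] at hqg ⊢
          exact hbase _ ⟨hcg, hqg, Or.inl ⟨rfl, Or.inr (by omega)⟩⟩
    have hcomp2 : ∀ t, pvGood plan t → pvConn plan s0 t →
        ¬ pvMemP (pvSetTrue visited x.toNat y.toNat) t →
        ∃ q ∈ rest ++ [(x+1,y),(x-1,y),(x,y+1),(x,y-1)], pvQok plan q ∧
          pvRA (pvAdj plan) (pvMemP (pvSetTrue visited x.toNat y.toNat)) (pvQcell q) t := by
      intro t hgt hct hmt'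
      have htc : t ≠ (x.toNat, y.toNat) := fun he => hmt' ((hm' t).mpr (Or.inr he))
      have hmt : ¬ pvMemP visited t := fun hmm => hmt' ((hm' t).mpr (Or.inl hmm))
      obtain ⟨q0, hq0m, hq0ok, hra⟩ := hcomp t hgt hct hmt
      have hVW : ∀ a, (pvMemP visited a ∨ a = (x.toNat, y.toNat)) ↔
          pvMemP (pvSetTrue visited x.toNat y.toNat) a := fun a => (hm' a).symm
      have hnbr : ∀ n, pvAdj plan (x.toNat, y.toNat) n →
          pvRA (pvAdj plan) (fun a => pvMemP visited a ∨ a = (x.toNat, y.toNat)) n t →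
          ∃ q ∈ rest ++ [(x+1,y),(x-1,y),(x,y+1),(x,y-1)], pvQok plan q ∧
            pvRA (pvAdj plan) (pvMemP (pvSetTrue visited x.toNat y.toNat)) (pvQcell q) t := by
        intro n hadj hran
        obtain ⟨n1, n2⟩ := n
        have hgn : pvGood plan (n1, n2) := hadj.2.1
        have hgn1 : n1 < plan.length := hgn.1
        have hgn2 : n2 < plan.headI.length := hgn.2.1
        have hran' := pvRA_congr hVW hran
        rcases hadj.2.2 with ⟨he, he2 | he2⟩ | ⟨he, he2 | he2⟩
        · -- n = (x.toNat, y.toNat + 1): enqueue (x, y+1)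
          have he' : x.toNat = n1 := he
          have he2' : y.toNat + 1 = n2 := he2
          have hcell : pvQcell (x, y + 1) = (n1, n2) := by
            have hxx : x.toNat = n1 := he'
            have hyy : (y + 1).toNat = n2 := by omega
            simp [pvQcell, hxx, hyy]
          refine ⟨(x, y + 1), List.mem_append_right _ (by simp),
            ⟨by omega, by omega, by omega, by omega⟩, ?_⟩
          rw [hcell]
          exact hran'
        · -- n = (x.toNat, y.toNat - 1): enqueue (x, y-1)
          have he' : x.toNat = n1 := he
          have he2' : n2 + 1 = y.toNat := he2
          have hcell : pvQcell (x, y - 1) = (n1, n2) := by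
            have hxx : x.toNat = n1 := he'
            have hyy : (y - 1).toNat = n2 := by omega
            simp [pvQcell, hxx, hyy]
          refine ⟨(x, y - 1), List.mem_append_right _ (by simp),
            ⟨by omega, by omega, by omega, by omega⟩, ?_⟩
          rw [hcell]
          exact hran'
        · -- n = (x.toNat + 1, y.toNat): enqueue (x+1, y)
          have he' : y.toNat = n2 := he
          have he2' : x.toNat + 1 = n1 := he2
          have hcell : pvQcell (x + 1, y) = (n1, n2) := by
            have hxx : (x + 1).toNat = n1 := by omega
            have hyy : y.toNat = n2 := he'
            simp [pvQcell, hxx, hyy]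
          refine ⟨(x + 1, y), List.mem_append_right _ (by simp),
            ⟨by omega, by omega, by omega, by omega⟩, ?_⟩
          rw [hcell]
          exact hran'
        · -- n = (x.toNat - 1, y.toNat): enqueue (x-1, y)
          have he' : y.toNat = n2 := he
          have he2' : n1 + 1 = x.toNat := he2
          have hcell : pvQcell (x - 1, y) = (n1, n2) := by
            have hxx : (x - 1).toNat = n1 := by omega
            have hyy : y.toNat = n2 := he'
            simp [pvQcell, hxx, hyy]
          refine ⟨(x - 1, y), List.mem_append_right _ (by simp),
            ⟨by omega, by omega, by omega, by omega⟩, ?_⟩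
          rw [hcell]
          exact hran'
      rcases List.mem_cons.mp hq0m with rfl | hq0m'
      · rcases pvRA_remove (pvAdj plan) (pvMemP visited) (x.toNat, y.toNat) _ _ hra with
          hra' | hteq | ⟨n, hadj, hra'⟩
        · exact ((pvRA_not_V hra') (Or.inr rfl)).elim
        · exact absurd hteq htc
        · exact hnbr n hadj hra'
      · rcases pvRA_remove (pvAdj plan) (pvMemP visited) (x.toNat, y.toNat) _ _ hra with
          hra' | hteq | ⟨n, hadj, hra'⟩
        · exact ⟨q0, List.mem_append_left _ hq0m', hq0ok, pvRA_congr hVW hra'⟩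
        · exact absurd hteq htc
        · exact hnbr n hadj hra'
    have hih := ih hq2 hcomp2
    rw [pvBfs_cons, if_neg h1, if_neg h2]
    rw [hih p, hm' p]
    constructor
    · rintro ((h | rfl) | h)
      · exact Or.inl h
      · exact Or.inr ⟨hcg, hconn⟩
      · exact Or.inr h
    · rintro (h | h)
      · exact Or.inl (Or.inl h)
      · exact Or.inr h

theorem pvBfs_start (plan : List (List String)) (s0 : Nat × Nat) (m : List (List Bool))
    (hg : pvGood plan s0) (hm : ¬ pvMemP m s0)
    (hcl : ∀ p q, pvMemP m p → pvAdj plan p q → pvMemP m q) :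
    ∀ p, pvMemP (pvBfs plan (plan.length : Int) (plan.headI.length : Int)
        [((s0.1 : Int), (s0.2 : Int))] m) p ↔
      (pvMemP m p ∨ (pvGood plan p ∧ pvConn plan s0 p)) := by
  have hqc : pvQcell ((s0.1 : Int), (s0.2 : Int)) = s0 := by
    simp [pvQcell]
  apply pvBfs_char plan s0
  · intro q hqm hqok hqg
    simp only [List.mem_singleton] at hqm
    subst hqm
    rw [hqc]
    exact Relation.ReflTransGen.refl
  · intro t hgt hct hmt
    have hok : pvQok plan ((s0.1 : Int), (s0.2 : Int)) := by
      refine ⟨Int.natCast_nonneg _, ?_, Int.natCast_nonneg _, ?_⟩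
      · show (s0.1 : Int) < (plan.length : Int)
        exact_mod_cast hg.1
      · show (s0.2 : Int) < (plan.headI.length : Int)
        exact_mod_cast hg.2.1
    refine ⟨((s0.1 : Int), (s0.2 : Int)), by simp, hok, ?_⟩
    rw [hqc]
    exact pvRA_of_closed (pvAdj plan) (pvMemP m) (pvAdj_symm plan) hcl s0 t hm hct

-- ---- correctness of B's union-find ----

def pvParOk (N : Nat) (parent : List Nat) : Prop :=
  parent.length = N ∧ ∀ i, parent.getD i i ≤ i

theorem dsuFind_le (parent : List Nat) (i : Nat) : dsuFind parent i ≤ i := by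
  induction i using Nat.strong_induction_on with
  | _ i ih =>
    rw [dsuFind]
    split
    · next h => exact le_of_lt (lt_of_le_of_lt (ih _ h) h)
    · exact le_refl i

theorem dsuFind_of_root (parent : List Nat) (i : Nat) (h : parent.getD i i = i) :
    dsuFind parent i = i := by
  rw [dsuFind]; simp only [h]; simp

theorem dsuFind_root {N : Nat} {parent : List Nat} (hok : pvParOk N parent) (i : Nat) :
    parent.getD (dsuFind parent i) (dsuFind parent i) = dsuFind parent i := by
  induction i using Nat.strong_induction_on with
  | _ i ih =>
    rw [dsuFind]
    split
    · next h => exact ih _ h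
    · next h => exact Nat.le_antisymm (hok.2 i) (Nat.le_of_not_lt h)

theorem dsuFind_set {N : Nat} {parent : List Nat} (hok : pvParOk N parent) (r r' : Nat)
    (hr : parent.getD r r = r) (hr' : parent.getD r' r' = r') (hlt : r' < r)
    (hrlen : r < parent.length) :
    ∀ i, dsuFind (parent.set r r') i =
      if dsuFind parent i = r then r' else dsuFind parent i := by
  intro i
  induction i using Nat.strong_induction_on with
  | _ i ih =>
    by_cases hir : i = r
    · subst hir
      have h1 : (parent.set i r').getD i i = r' := by rw [pvSetGetD]; simp [hrlen]
      have hfi : dsuFind parent i = i := dsuFind_of_root parent i hr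
      rw [dsuFind, h1, dif_pos hlt, ih r' hlt, dsuFind_of_root parent r' hr',
        if_neg (by omega), hfi, if_pos rfl]
    · have h1 : (parent.set r r').getD i i = parent.getD i i := by rw [pvSetGetD]; simp [hir]
      by_cases hp : parent.getD i i < i
      · have hstep : dsuFind parent i = dsuFind parent (parent.getD i i) := by
          conv_lhs => rw [dsuFind]
          rw [dif_pos hp]
        rw [dsuFind, h1, dif_pos hp, ih _ hp, ← hstep]
      · have hfi : dsuFind parent i = i := by rw [dsuFind, dif_neg hp]
        rw [dsuFind, h1, dif_neg hp, hfi, if_neg hir]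

theorem pvParOk_union {N : Nat} {parent : List Nat} (hok : pvParOk N parent) (a b : Nat) :
    pvParOk N (dsuUnion parent a b) := by
  simp only [dsuUnion]
  split_ifs with h1 h2
  · refine ⟨by simp [hok.1], fun i => ?_⟩
    rw [pvSetGetD]
    split_ifs with h3
    · exact h3.1 ▸ le_of_lt h1
    · exact hok.2 i
  · refine ⟨by simp [hok.1], fun i => ?_⟩
    rw [pvSetGetD]
    split_ifs with h3
    · exact h3.1 ▸ le_of_lt h2
    · exact hok.2 i
  · exact hok

theorem dsuUnion_char {N : Nat} {parent : List Nat} (hok : pvParOk N parent)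
    (a b : Nat) (ha : a < N) (hb : b < N) :
    ∀ x y, dsuFind (dsuUnion parent a b) x = dsuFind (dsuUnion parent a b) y ↔
      (dsuFind parent x = dsuFind parent y ∨
       (dsuFind parent x = dsuFind parent a ∧ dsuFind parent y = dsuFind parent b) ∨
       (dsuFind parent x = dsuFind parent b ∧ dsuFind parent y = dsuFind parent a)) := by
  intro x y
  have hra := dsuFind_root hok a
  have hrb := dsuFind_root hok b
  have hlen : parent.length = N := hok.1
  simp only [dsuUnion]
  split_ifs with h1 h2
  · have hset := dsuFind_set hok (dsuFind parent b) (dsuFind parent a) hrb hra h1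
      (by rw [hlen]; exact lt_of_le_of_lt (dsuFind_le parent b) hb)
    rw [hset x, hset y]
    by_cases hx : dsuFind parent x = dsuFind parent b <;>
      by_cases hy : dsuFind parent y = dsuFind parent b <;> simp [hx, hy] <;> omega
  · have hset := dsuFind_set hok (dsuFind parent a) (dsuFind parent b) hra hrb h2
      (by rw [hlen]; exact lt_of_le_of_lt (dsuFind_le parent a) ha)
    rw [hset x, hset y]
    by_cases hx : dsuFind parent x = dsuFind parent a <;>
      by_cases hy : dsuFind parent y = dsuFind parent a <;> simp [hx, hy] <;> omega
  · have heq : dsuFind parent a = dsuFind parent b := by omega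
    constructor
    · intro h; exact Or.inl h
    · rintro (h | ⟨h1', h2'⟩ | ⟨h1', h2'⟩)
      · exact h
      · rw [h1', h2', heq]
      · rw [h1', h2', ← heq]

theorem dsu_fold_char (N : Nat) :
    ∀ (pairs : List (Nat × Nat)) (parent : List Nat), pvParOk N parent →
      (∀ pr ∈ pairs, pr.1 < N ∧ pr.2 < N) →
      pvParOk N (pairs.foldl (fun par pr => dsuUnion par pr.1 pr.2) parent) ∧
      ∀ x y, dsuFind (pairs.foldl (fun par pr => dsuUnion par pr.1 pr.2) parent) x =
               dsuFind (pairs.foldl (fun par pr => dsuUnion par pr.1 pr.2) parent) y ↔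
             Relation.EqvGen
               (fun u v => dsuFind parent u = dsuFind parent v ∨ (u, v) ∈ pairs) x y := by
  intro pairs
  induction pairs with
  | nil =>
    intro parent hok _
    refine ⟨hok, fun x y => ?_⟩
    simp only [List.foldl_nil]
    constructor
    · intro h; exact Relation.EqvGen.rel _ _ (Or.inl h)
    · intro h
      induction h with
      | rel u v h =>
        rcases h with h | h
        · exact h
        · simp at h
      | refl u => rfl
      | symm u v _ ih => exact ih.symm
      | trans u v w _ _ ih1 ih2 => exact ih1.trans ih2
  | cons pr rest ih =>
    intro parent hok hlt
    have hpr := hlt pr (by simp)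
    have hok' := pvParOk_union hok pr.1 pr.2
    obtain ⟨hokF, hchar⟩ := ih (dsuUnion parent pr.1 pr.2) hok'
      (fun q hq => hlt q (List.mem_cons_of_mem _ hq))
    refine ⟨by simpa using hokF, fun x y => ?_⟩
    simp only [List.foldl_cons]
    rw [hchar x y]
    have huc := dsuUnion_char hok pr.1 pr.2 hpr.1 hpr.2
    have hprmem : (pr.1, pr.2) ∈ pr :: rest := by simp
    constructor
    · intro h
      induction h with
      | rel u v h =>
        rcases h with h | h
        · rcases (huc u v).mp h with h' | ⟨h1', h2'⟩ | ⟨h1', h2'⟩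
          · exact Relation.EqvGen.rel _ _ (Or.inl h')
          · exact Relation.EqvGen.trans _ _ _ (Relation.EqvGen.rel _ _ (Or.inl h1'))
              (Relation.EqvGen.trans _ _ _ (Relation.EqvGen.rel _ _ (Or.inr hprmem))
                (Relation.EqvGen.symm _ _ (Relation.EqvGen.rel _ _ (Or.inl h2'))))
          · exact Relation.EqvGen.trans _ _ _ (Relation.EqvGen.rel _ _ (Or.inl h1'))
              (Relation.EqvGen.symm _ _
                (Relation.EqvGen.trans _ _ _ (Relation.EqvGen.rel _ _ (Or.inl h2'))
                  (Relation.EqvGen.rel _ _ (Or.inr hprmem))))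
        · exact Relation.EqvGen.rel _ _ (Or.inr (List.mem_cons_of_mem _ h))
      | refl u => exact Relation.EqvGen.refl u
      | symm u v _ ih2 => exact Relation.EqvGen.symm _ _ ih2
      | trans u v w _ _ ih1 ih2 => exact Relation.EqvGen.trans _ _ _ ih1 ih2
    · intro h
      induction h with
      | rel u v h =>
        rcases h with h | h
        · exact Relation.EqvGen.rel _ _ (Or.inl ((huc u v).mpr (Or.inl h)))
        · rcases List.mem_cons.mp h with h | h
          · have hu : u = pr.1 := congrArg Prod.fst h
            have hv : v = pr.2 := congrArg Prod.snd h
            subst hu; subst hv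
            exact Relation.EqvGen.rel _ _ (Or.inl ((huc _ _).mpr (Or.inr (Or.inl ⟨rfl, rfl⟩))))
          · exact Relation.EqvGen.rel _ _ (Or.inr h)
      | refl u => exact Relation.EqvGen.refl u
      | symm u v _ ih2 => exact Relation.EqvGen.symm _ _ ih2
      | trans u v w _ _ ih1 ih2 => exact Relation.EqvGen.trans _ _ _ ih1 ih2

theorem pvGetD_range (N i : Nat) : (List.range N).getD i i = i := by
  rcases Nat.lt_or_ge i N with h | h
  · simp [List.getD_eq_getElem?_getD, List.getElem?_range, h]
  · have h2 : (List.range N)[i]? = none := List.getElem?_eq_none_iff.mpr (by simpa using h)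
    simp [List.getD_eq_getElem?_getD, h2]

theorem dsuFind_range (N i : Nat) : dsuFind (List.range N) i = i :=
  dsuFind_of_root _ _ (pvGetD_range N i)

-- ---- the pair list B unions, and its meaning ----

def pvIdx (plan : List (List String)) (p : Nat × Nat) : Nat := p.1 * plan.headI.length + p.2

def pvCellList (plan : List (List String)) : List (Nat × Nat) :=
  (List.range plan.length).flatMap (fun i => (List.range plan.headI.length).map (fun j => (i, j)))

def pvPairsAt (plan : List (List String)) (p : Nat × Nat) : List (Nat × Nat) :=
  if pvCell plan p.1 p.2 ≠ "#" then
    (if p.1 + 1 < plan.length ∧ pvCell plan (p.1+1) p.2 ≠ "#" then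
      [(pvIdx plan p, pvIdx plan (p.1+1, p.2))] else []) ++
    (if p.2 + 1 < plan.headI.length ∧ pvCell plan p.1 (p.2+1) ≠ "#" then
      [(pvIdx plan p, pvIdx plan (p.1, p.2+1))] else [])
  else []

def pvPairList (plan : List (List String)) : List (Nat × Nat) :=
  (pvCellList plan).flatMap (pvPairsAt plan)

def pvParentF (plan : List (List String)) : List Nat :=
  (pvPairList plan).foldl (fun par pr => dsuUnion par pr.1 pr.2)
    (List.range (plan.length * plan.headI.length))

theorem pvIdx_inj (plan : List (List String)) {p q : Nat × Nat}
    (hp : p.2 < plan.headI.length) (hq : q.2 < plan.headI.length)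
    (h : pvIdx plan p = pvIdx plan q) : p = q := by
  have hC : 0 < plan.headI.length := lt_of_le_of_lt (Nat.zero_le _) hp
  unfold pvIdx at h
  have h1 : p.1 = q.1 := by
    have e1 : (p.1 * plan.headI.length + p.2) / plan.headI.length = p.1 := by
      rw [Nat.mul_comm, Nat.mul_add_div hC, Nat.div_eq_of_lt hp, Nat.add_zero]
    have e2 : (q.1 * plan.headI.length + q.2) / plan.headI.length = q.1 := by
      rw [Nat.mul_comm, Nat.mul_add_div hC, Nat.div_eq_of_lt hq, Nat.add_zero]
    rw [← e1, ← e2, h]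
  have h2 : p.2 = q.2 := by
    rw [h1] at h; omega
  exact Prod.ext h1 h2

theorem pvIdx_lt (plan : List (List String)) {p : Nat × Nat}
    (hp1 : p.1 < plan.length) (hp2 : p.2 < plan.headI.length) :
    pvIdx plan p < plan.length * plan.headI.length := by
  unfold pvIdx
  calc p.1 * plan.headI.length + p.2 < (p.1 + 1) * plan.headI.length := by
        have : (p.1 + 1) * plan.headI.length = p.1 * plan.headI.length + plan.headI.length := by ring
        omega
    _ ≤ plan.length * plan.headI.length := Nat.mul_le_mul_right _ hp1

theorem mem_pvCellList (plan : List (List String)) (p : Nat × Nat) :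
    p ∈ pvCellList plan ↔ p.1 < plan.length ∧ p.2 < plan.headI.length := by
  unfold pvCellList
  simp only [List.mem_flatMap, List.mem_map, List.mem_range]
  constructor
  · rintro ⟨i, hi, j, hj, rfl⟩
    exact ⟨hi, hj⟩
  · rintro ⟨h1, h2⟩
    exact ⟨p.1, h1, p.2, h2, rfl⟩

theorem pvPairList_pairs_lt (plan : List (List String)) :
    ∀ pr ∈ pvPairList plan, pr.1 < plan.length * plan.headI.length ∧
      pr.2 < plan.length * plan.headI.length := by
  intro pr hpr
  rcases List.mem_flatMap.mp hpr with ⟨p, hp, hpair⟩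
  rcases (mem_pvCellList plan p).mp hp with ⟨hp1, hp2⟩
  unfold pvPairsAt at hpair
  by_cases h0 : pvCell plan p.1 p.2 ≠ "#"
  · rw [if_pos h0] at hpair
    rcases List.mem_append.mp hpair with h | h
    · by_cases h1 : p.1 + 1 < plan.length ∧ pvCell plan (p.1+1) p.2 ≠ "#"
      · rw [if_pos h1] at h
        simp only [List.mem_singleton] at h
        subst h
        exact ⟨pvIdx_lt plan hp1 hp2, pvIdx_lt plan h1.1 hp2⟩
      · rw [if_neg h1] at h; simp at h
    · by_cases h2 : p.2 + 1 < plan.headI.length ∧ pvCell plan p.1 (p.2+1) ≠ "#"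
      · rw [if_pos h2] at h
        simp only [List.mem_singleton] at h
        subst h
        exact ⟨pvIdx_lt plan hp1 hp2, pvIdx_lt plan hp1 h2.1⟩
      · rw [if_neg h2] at h; simp at h
  · rw [if_neg h0] at hpair; simp at hpair

theorem pvPairList_adj (plan : List (List String)) {u v : Nat} (h : (u, v) ∈ pvPairList plan) :
    ∃ p q, pvAdj plan p q ∧ u = pvIdx plan p ∧ v = pvIdx plan q := by
  rcases List.mem_flatMap.mp h with ⟨p, hp, hpair⟩
  rcases (mem_pvCellList plan p).mp hp with ⟨hp1, hp2⟩
  unfold pvPairsAt at hpair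
  by_cases h0 : pvCell plan p.1 p.2 ≠ "#"
  · rw [if_pos h0] at hpair
    rcases List.mem_append.mp hpair with h | h
    · by_cases h1 : p.1 + 1 < plan.length ∧ pvCell plan (p.1+1) p.2 ≠ "#"
      · rw [if_pos h1] at h
        simp only [List.mem_singleton, Prod.mk.injEq] at h
        refine ⟨p, (p.1 + 1, p.2), ⟨⟨hp1, hp2, h0⟩, ⟨h1.1, hp2, h1.2⟩, Or.inr ⟨rfl, Or.inl rfl⟩⟩,
          h.1, h.2⟩
      · rw [if_neg h1] at h; simp at h
    · by_cases h2 : p.2 + 1 < plan.headI.length ∧ pvCell plan p.1 (p.2+1) ≠ "#"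
      · rw [if_pos h2] at h
        simp only [List.mem_singleton, Prod.mk.injEq] at h
        refine ⟨p, (p.1, p.2 + 1), ⟨⟨hp1, hp2, h0⟩, ⟨hp1, h2.1, h2.2⟩, Or.inl ⟨rfl, Or.inl rfl⟩⟩,
          h.1, h.2⟩
      · rw [if_neg h2] at h; simp at h
  · rw [if_neg h0] at hpair; simp at hpair

theorem pvAdj_pair_mem (plan : List (List String)) {p q : Nat × Nat} (h : pvAdj plan p q) :
    (pvIdx plan p, pvIdx plan q) ∈ pvPairList plan ∨
    (pvIdx plan q, pvIdx plan p) ∈ pvPairList plan := by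
  have hmemd : ∀ i j, i < plan.length → j < plan.headI.length → pvCell plan i j ≠ "#" →
      i + 1 < plan.length → pvCell plan (i+1) j ≠ "#" →
      (pvIdx plan (i, j), pvIdx plan (i+1, j)) ∈ pvPairList plan := by
    intro i j h1 h2 h3 h4 h5
    apply List.mem_flatMap.mpr
    refine ⟨(i, j), (mem_pvCellList plan _).mpr ⟨h1, h2⟩, ?_⟩
    unfold pvPairsAt
    rw [if_pos h3]
    apply List.mem_append.mpr
    left
    rw [if_pos ⟨h4, h5⟩]
    exact List.mem_singleton.mpr rfl
  have hmemr : ∀ i j, i < plan.length → j < plan.headI.length → pvCell plan i j ≠ "#" →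
      j + 1 < plan.headI.length → pvCell plan i (j+1) ≠ "#" →
      (pvIdx plan (i, j), pvIdx plan (i, j+1)) ∈ pvPairList plan := by
    intro i j h1 h2 h3 h4 h5
    apply List.mem_flatMap.mpr
    refine ⟨(i, j), (mem_pvCellList plan _).mpr ⟨h1, h2⟩, ?_⟩
    unfold pvPairsAt
    rw [if_pos h3]
    apply List.mem_append.mpr
    right
    rw [if_pos ⟨h4, h5⟩]
    exact List.mem_singleton.mpr rfl
  obtain ⟨hp, hq, hrel⟩ := h
  obtain ⟨p1, p2⟩ := p
  obtain ⟨q1, q2⟩ := q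
  have hp1 : p1 < plan.length := hp.1
  have hp2 : p2 < plan.headI.length := hp.2.1
  have hp3 : pvCell plan p1 p2 ≠ "#" := hp.2.2
  have hq1 : q1 < plan.length := hq.1
  have hq2 : q2 < plan.headI.length := hq.2.1
  have hq3 : pvCell plan q1 q2 ≠ "#" := hq.2.2
  rcases hrel with ⟨he, he2 | he2⟩ | ⟨he, he2 | he2⟩
  · -- p1 = q1, p2 + 1 = q2 : q is the right neighbour of p
    have he' : p1 = q1 := he
    have he2' : p2 + 1 = q2 := he2
    left
    rw [show ((q1, q2) : Nat × Nat) = (p1, p2 + 1) from Prod.ext he'.symm he2'.symm]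
    exact hmemr p1 p2 hp1 hp2 hp3 (by omega) (by rw [he2', he']; exact hq3)
  · -- p1 = q1, q2 + 1 = p2 : p is the right neighbour of q
    have he' : p1 = q1 := he
    have he2' : q2 + 1 = p2 := he2
    right
    rw [show ((p1, p2) : Nat × Nat) = (q1, q2 + 1) from Prod.ext he' he2'.symm]
    exact hmemr q1 q2 hq1 hq2 hq3 (by omega) (by rw [he2']; rw [← he']; exact hp3)
  · -- p2 = q2, p1 + 1 = q1 : q is below p
    have he' : p2 = q2 := he
    have he2' : p1 + 1 = q1 := he2
    left
    rw [show ((q1, q2) : Nat × Nat) = (p1 + 1, p2) from Prod.ext he2'.symm he'.symm]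
    exact hmemd p1 p2 hp1 hp2 hp3 (by omega) (by rw [he2', he']; exact hq3)
  · -- p2 = q2, q1 + 1 = p1 : p is below q
    have he' : p2 = q2 := he
    have he2' : q1 + 1 = p1 := he2
    right
    rw [show ((p1, p2) : Nat × Nat) = (q1 + 1, q2) from Prod.ext he2'.symm he']
    exact hmemd q1 q2 hq1 hq2 hq3 (by omega) (by rw [he2']; rw [← he']; exact hp3)

-- union-find roots decide connectivity
theorem pvConn_iff_find (plan : List (List String)) (p q : Nat × Nat)
    (hp : pvGood plan p) (hq : pvGood plan q) :
    dsuFind (pvParentF plan) (pvIdx plan p) = dsuFind (pvParentF plan) (pvIdx plan q) ↔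
      pvConn plan p q := by
  obtain ⟨hokF, hchar⟩ := dsu_fold_char (plan.length * plan.headI.length) (pvPairList plan)
    (List.range (plan.length * plan.headI.length))
    ⟨by simp, fun i => le_of_eq (pvGetD_range _ i)⟩
    (pvPairList_pairs_lt plan)
  unfold pvParentF
  rw [hchar (pvIdx plan p) (pvIdx plan q)]
  have hrel : (fun u v => dsuFind (List.range (plan.length * plan.headI.length)) u =
      dsuFind (List.range (plan.length * plan.headI.length)) v ∨ (u, v) ∈ pvPairList plan) =
      (fun u v => u = v ∨ (u, v) ∈ pvPairList plan) := by
    funext u v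
    simp [dsuFind_range]
  rw [hrel]
  constructor
  · intro h
    have hphi : ∀ u v, Relation.EqvGen (fun u v => u = v ∨ (u, v) ∈ pvPairList plan) u v →
        u = v ∨ ∃ p' q', pvGood plan p' ∧ pvGood plan q' ∧ u = pvIdx plan p' ∧ v = pvIdx plan q' ∧
          pvConn plan p' q' := by
      intro u v h
      induction h with
      | rel u v h =>
        rcases h with h | h
        · exact Or.inl h
        · rcases pvPairList_adj plan h with ⟨p', q', hadj, rfl, rfl⟩
          exact Or.inr ⟨p', q', hadj.1, hadj.2.1, rfl, rfl, Relation.ReflTransGen.single hadj⟩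
      | refl u => exact Or.inl rfl
      | symm u v _ ih =>
        rcases ih with rfl | ⟨p', q', hg1, hg2, rfl, rfl, h5⟩
        · exact Or.inl rfl
        · exact Or.inr ⟨q', p', hg2, hg1, rfl, rfl, pvConn_symm plan h5⟩
      | trans u v w _ _ ih1 ih2 =>
        rcases ih1 with rfl | ⟨p', q', hg1, hg2, rfl, rfl, h5⟩
        · exact ih2
        · rcases ih2 with rfl | ⟨p'', q'', hg1', hg2', heq, rfl, h5'⟩
          · exact Or.inr ⟨p', q', hg1, hg2, rfl, rfl, h5⟩
          · have hqq : q' = p'' := pvIdx_inj plan hg2.2.1 hg1'.2.1 heq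
            exact Or.inr ⟨p', q'', hg1, hg2', rfl, rfl, h5.trans (hqq ▸ h5')⟩
    rcases hphi _ _ h with heq | ⟨p', q', hg1, hg2, he1, he2, h5⟩
    · have hpq : p = q := pvIdx_inj plan hp.2.1 hq.2.1 heq
      rw [hpq]
      exact Relation.ReflTransGen.refl
    · have hep : p' = p := pvIdx_inj plan hg1.2.1 hp.2.1 he1.symm
      have heq' : q' = q := pvIdx_inj plan hg2.2.1 hq.2.1 he2.symm
      rw [← hep, ← heq']
      exact h5
  · intro h
    clear hq
    induction h with
    | refl => exact Relation.EqvGen.refl _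
    | tail _ hadj ih =>
      refine Relation.EqvGen.trans _ _ _ ih ?_
      rcases pvAdj_pair_mem plan hadj with hmem | hmem
      · exact Relation.EqvGen.rel _ _ (Or.inr hmem)
      · exact Relation.EqvGen.symm _ _ (Relation.EqvGen.rel _ _ (Or.inr hmem))

-- ---- fold bookkeeping ----

theorem pvFoldl_flatMap {α β γ : Type} (l : List α) (f : α → List β) (g : γ → β → γ) :
    ∀ init, (l.flatMap f).foldl g init = l.foldl (fun acc x => (f x).foldl g acc) init := by
  induction l with
  | nil => intro init; rfl
  | cons a l ih =>
    intro init
    simp only [List.flatMap_cons, List.foldl_append, List.foldl_cons]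
    exact ih _

theorem pvFoldl_nested {α : Type} (R C : Nat) (g : α → (Nat × Nat) → α) (init : α) :
    (List.range R).foldl (fun st i => (List.range C).foldl (fun st j => g st (i, j)) st) init =
      ((List.range R).flatMap (fun i => (List.range C).map (fun j => (i, j)))).foldl g init := by
  rw [pvFoldl_flatMap]
  congr 1
  funext acc i
  rw [List.foldl_map]

theorem pvParent_eq_parentF (plan : List (List String)) :
    (List.range plan.length).foldl (fun par i =>
      (List.range plan.headI.length).foldl (fun par j =>
        if pvCell plan i j ≠ "#" then
          let par1 := if i + 1 < plan.length ∧ pvCell plan (i+1) j ≠ "#" then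
              dsuUnion par (i * plan.headI.length + j) ((i+1) * plan.headI.length + j) else par
          if j + 1 < plan.headI.length ∧ pvCell plan i (j+1) ≠ "#" then
            dsuUnion par1 (i * plan.headI.length + j) (i * plan.headI.length + j + 1) else par1
        else par) par) (List.range (plan.length * plan.headI.length)) = pvParentF plan := by
  unfold pvParentF pvPairList pvCellList
  rw [pvFoldl_flatMap]
  rw [← pvFoldl_nested plan.length plan.headI.length
    (fun acc x => (pvPairsAt plan x).foldl (fun par pr => dsuUnion par pr.1 pr.2) acc)
    (List.range (plan.length * plan.headI.length))]
  congr 1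
  funext par i
  congr 1
  funext par j
  unfold pvPairsAt
  by_cases h0 : pvCell plan i j ≠ "#"
  · rw [if_pos h0, if_pos h0]
    by_cases h1 : i + 1 < plan.length ∧ pvCell plan (i+1) j ≠ "#" <;>
      by_cases h2 : j + 1 < plan.headI.length ∧ pvCell plan i (j+1) ≠ "#" <;>
      simp [h1, h2, pvIdx, Nat.add_assoc]
  · rw [if_neg h0, if_neg h0]
    rfl

-- the joint scan: A's runs counter advances exactly when B's root set grows
theorem pvScan_agree (plan : List (List String))
    (hfind : ∀ p q, pvGood plan p → pvGood plan q →
      (dsuFind (pvParentF plan) (pvIdx plan p) = dsuFind (pvParentF plan) (pvIdx plan q) ↔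
        pvConn plan p q)) :
    ∀ (cells : List (Nat × Nat)) (m : List (List Bool)) (runs : Int) (s : PySem.Set Nat),
      (∀ p ∈ cells, p.1 < plan.length ∧ p.2 < plan.headI.length) →
      (∀ p, pvMemP m p → pvGood plan p) →
      (∀ p q, pvMemP m p → pvAdj plan p q → pvMemP m q) →
      (∀ p, pvGood plan p → (pvMemP m p ↔ dsuFind (pvParentF plan) (pvIdx plan p) ∈ s)) →
      (cells.foldl (fun st p =>
        if pvCell plan p.1 p.2 = "*" ∧ pvMem st.1 p.1 p.2 = false then
          (pvBfs plan (plan.length : Int) (plan.headI.length : Int)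
            [((p.1 : Int), (p.2 : Int))] st.1, st.2 + 1)
        else st) (m, runs)).2 - runs =
      ((cells.foldl (fun s p =>
        if pvCell plan p.1 p.2 = "*" then
          PySem.Set.add s (dsuFind (pvParentF plan) (pvIdx plan p)) else s) s).length : Int) -
        (s.length : Int) := by
  intro cells
  induction cells with
  | nil =>
    intro m runs s _ _ _ _
    simp
  | cons p rest ih =>
    intro m runs s hcells hgood hcl hlink
    have hp := hcells p (by simp)
    have hrest : ∀ p' ∈ rest, p'.1 < plan.length ∧ p'.2 < plan.headI.length :=
      fun p' h => hcells p' (by simp [h])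
    simp only [List.foldl_cons]
    by_cases hstar : pvCell plan p.1 p.2 = "*"
    · by_cases hm : pvMem m p.1 p.2 = false
      · have hgoodp : pvGood plan p := ⟨hp.1, hp.2, by simp [hstar]⟩
        have hmP : ¬ pvMemP m p := by simp [pvMemP, hm]
        have hchar := pvBfs_start plan p m hgoodp hmP hcl
        rw [if_pos ⟨hstar, hm⟩, if_pos hstar]
        have hfp := hlink p hgoodp
        have hnot : dsuFind (pvParentF plan) (pvIdx plan p) ∉ s := fun hmem => hmP (hfp.mpr hmem)
        have hgood' : ∀ p', pvMemP (pvBfs plan (plan.length : Int) (plan.headI.length : Int)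
            [((p.1 : Int), (p.2 : Int))] m) p' → pvGood plan p' := by
          intro p' h'
          rcases (hchar p').mp h' with h' | h'
          · exact hgood p' h'
          · exact h'.1
        have hcl' : ∀ p' q', pvMemP (pvBfs plan (plan.length : Int) (plan.headI.length : Int)
            [((p.1 : Int), (p.2 : Int))] m) p' → pvAdj plan p' q' →
            pvMemP (pvBfs plan (plan.length : Int) (plan.headI.length : Int)
              [((p.1 : Int), (p.2 : Int))] m) q' := by
          intro p' q' h' hadj
          apply (hchar q').mpr
          rcases (hchar p').mp h' with h' | h'
          · exact Or.inl (hcl p' q' h' hadj)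
          · exact Or.inr ⟨hadj.2.1, h'.2.tail hadj⟩
        have hlink' : ∀ p', pvGood plan p' →
            (pvMemP (pvBfs plan (plan.length : Int) (plan.headI.length : Int)
              [((p.1 : Int), (p.2 : Int))] m) p' ↔
             dsuFind (pvParentF plan) (pvIdx plan p') ∈
               PySem.Set.add s (dsuFind (pvParentF plan) (pvIdx plan p))) := by
          intro p' hg'
          rw [PySem.Set.mem_add]
          constructor
          · intro h'
            rcases (hchar p').mp h' with h' | h'
            · exact Or.inl ((hlink p' hg').mp h')
            · exact Or.inr ((hfind p p' hgoodp hg').mpr h'.2).symm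
          · rintro (h' | h')
            · exact (hchar p').mpr (Or.inl ((hlink p' hg').mpr h'))
            · exact (hchar p').mpr (Or.inr ⟨hg', (hfind p p' hgoodp hg').mp h'.symm⟩)
        have hihh := ih (pvBfs plan (plan.length : Int) (plan.headI.length : Int)
            [((p.1 : Int), (p.2 : Int))] m) (runs + 1)
          (PySem.Set.add s (dsuFind (pvParentF plan) (pvIdx plan p))) hrest hgood' hcl' hlink'
        have hlen : (PySem.Set.add s (dsuFind (pvParentF plan) (pvIdx plan p))).length =
            s.length + 1 := by
          rw [PySem.Set.add_of_not_mem hnot]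
          simp
        rw [hlen] at hihh
        push_cast at hihh ⊢
        omega
      · have hmT : pvMem m p.1 p.2 = true := by simpa using hm
        have hgoodp : pvGood plan p := ⟨hp.1, hp.2, by simp [hstar]⟩
        rw [if_neg (by simp [hmT]), if_pos hstar]
        have hmem : dsuFind (pvParentF plan) (pvIdx plan p) ∈ s := (hlink p hgoodp).mp hmT
        rw [PySem.Set.add_of_mem hmem]
        exact ih m runs s hrest hgood hcl hlink
    · rw [if_neg (fun hcon => hstar hcon.1), if_neg hstar]
      exact ih m runs s hrest hgood hcl hlink

-- ===== VERDICT (by name: the statement is the Claim_ definition above) =====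
theorem BFSSolution_spec : Claim_equal_BFSSolution := by
  intro plan _ _
  unfold Spec_BFSSolution
  have hA : BFSSolution plan = ((pvCellList plan).foldl (fun st p =>
      if pvCell plan p.1 p.2 = "*" ∧ pvMem st.1 p.1 p.2 = false then
        (pvBfs plan (plan.length : Int) (plan.headI.length : Int)
          [((p.1 : Int), (p.2 : Int))] st.1, st.2 + 1)
      else st) ((List.replicate plan.length (List.replicate plan.headI.length false)),
        (0 : Int))).2 := by
    rw [BFSSolution]
    exact congrArg Prod.snd (pvFoldl_nested plan.length plan.headI.length
      (fun (st : List (List Bool) × Int) (p : Nat × Nat) =>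
        if pvCell plan p.1 p.2 = "*" ∧ pvMem st.1 p.1 p.2 = false then
          (pvBfs plan (plan.length : Int) (plan.headI.length : Int)
            [((p.1 : Int), (p.2 : Int))] st.1, st.2 + 1)
        else st)
      ((List.replicate plan.length (List.replicate plan.headI.length false)), (0 : Int)))
  have hB : BFSSolution_alt plan = (((pvCellList plan).foldl (fun (s : PySem.Set Nat) p =>
      if pvCell plan p.1 p.2 = "*" then
        PySem.Set.add s (dsuFind (pvParentF plan) (pvIdx plan p)) else s)
      PySem.Set.empty).length : Int) := by
    simp only [BFSSolution_alt]
    rw [pvParent_eq_parentF plan]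
    exact congrArg (fun n : Nat => (n : Int))
      (congrArg List.length (pvFoldl_nested plan.length plan.headI.length
        (fun (s : PySem.Set Nat) (p : Nat × Nat) =>
          if pvCell plan p.1 p.2 = "*" then
            PySem.Set.add s (dsuFind (pvParentF plan) (pvIdx plan p)) else s)
        PySem.Set.empty))
  have hmain := pvScan_agree plan (fun p q hp hq => pvConn_iff_find plan p q hp hq)
    (pvCellList plan)
    (List.replicate plan.length (List.replicate plan.headI.length false)) 0 PySem.Set.empty
    (fun p hp => (mem_pvCellList plan p).mp hp)
    (fun p h => absurd h (by simp [pvMemP, pvMem_replicate]))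
    (fun p q h _ => absurd h (by simp [pvMemP, pvMem_replicate]))
    (fun p _ => by simp [pvMemP, pvMem_replicate, PySem.Set.empty])
  rw [hA, hB]
  simp only [PySem.Set.empty, List.length_nil] at hmain ⊢
  push_cast at hmain ⊢
  omega
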